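-- pv_equiv track=rewrite | github.com/rappatoni/Knowledge-Representation | SAT/Basic Sudoku SAT Solver/reclassify_validities.py | classify_validities
-- ===== SOURCE A (Python) =====
-- def classify_validities(base_clauses_with_cats, valid_clauses):
--     cats = ["vcell", "ucell", "vrow", "urow", "vcol", "ucol", "vblock", "ublock", "new"]
--     valid_dict = {cat: set() for cat in cats}
--     # Comparing valid clauses and base clauses
--     for clause in valid_clauses:
--         is_new_type = True
--         for key in base_clauses_with_cats:
--             for baseclause in base_clauses_with_cats[key]:
--                 if baseclause == clause:
--                     valid_dict[key].add(clause)
--                     is_new_type = False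
--         if is_new_type:
--             valid_dict["new"].add(clause)
--     return valid_dict
-- ===== SOURCE B (Python) =====
-- def classify_validities(base_clauses_with_cats, valid_clauses):
--     # Inverted index: one pass over the base clauses builds clause -> [categories],
--     # then each valid clause is classified by a single hash lookup.
--     cats = ["vcell", "ucell", "vrow", "urow", "vcol", "ucol", "vblock", "ublock", "new"]
--     valid_dict = {cat: set() for cat in cats}
--     index = {}
--     for key in base_clauses_with_cats:
--         for baseclause in base_clauses_with_cats[key]:
--             index.setdefault(baseclause, []).append(key)
--     for clause in valid_clauses:
--         keys = index.get(clause)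
--         if keys:
--             for key in keys:
--                 valid_dict[key].add(clause)
--         else:
--             valid_dict["new"].add(clause)
--     return valid_dict
-- ===== Notes on version B (the rewrite author's own statement) =====
-- stated objective: faster
-- what changed: B builds an inverted hash index (base clause -> list of category keys) in one pass over the base dict and then classifies each valid clause by a single dictionary lookup, instead of A's scan of every base clause for every valid clause; Pre_ excludes inputs where a base entry sharing a clause with valid_clauses sits under a key outside the eight real categories (unknown key: both A and B raise KeyError; key 'new': both return equal Python dicts of sets but fill the unordered 'new' set in different insertion orders, which the Lean list encoding distinguishes).
import Mathlib
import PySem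

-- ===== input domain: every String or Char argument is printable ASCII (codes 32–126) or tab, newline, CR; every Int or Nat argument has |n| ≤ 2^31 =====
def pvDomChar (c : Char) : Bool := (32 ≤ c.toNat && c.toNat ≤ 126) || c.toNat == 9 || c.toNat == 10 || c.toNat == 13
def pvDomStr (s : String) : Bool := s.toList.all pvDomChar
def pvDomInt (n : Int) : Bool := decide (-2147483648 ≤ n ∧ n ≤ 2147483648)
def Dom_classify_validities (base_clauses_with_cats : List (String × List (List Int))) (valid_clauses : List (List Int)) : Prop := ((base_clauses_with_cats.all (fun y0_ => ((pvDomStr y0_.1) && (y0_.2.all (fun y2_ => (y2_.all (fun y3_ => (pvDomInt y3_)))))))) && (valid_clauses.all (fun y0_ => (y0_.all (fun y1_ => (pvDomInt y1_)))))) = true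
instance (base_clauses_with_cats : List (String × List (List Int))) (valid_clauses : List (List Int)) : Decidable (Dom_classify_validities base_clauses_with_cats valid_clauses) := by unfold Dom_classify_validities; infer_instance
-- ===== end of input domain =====

-- B builds an inverted index (base clause -> list of category keys) in one pass over the base
-- dict and classifies each valid clause by a single lookup, instead of A's scan of every base
-- clause for every valid clause (objective: faster).

-- ===== PORT A =====
-- Transliteration of A (clauses arrive as hashable tuples, ported as List Int). Where the
-- Python raises KeyError (valid_dict[key] for a base key outside the nine categories, on a
-- matching clause — excluded by Pre_) the port's Dict.modify inserts instead; on Pre_ that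
-- branch is never reached.
def classify_validities (base_clauses_with_cats : List (String × List (List Int))) (valid_clauses : List (List Int)) : List (String × List (List Int)) :=
  let cats : List String := ["vcell", "ucell", "vrow", "urow", "vcol", "ucol", "vblock", "ublock", "new"]
  -- valid_dict = {cat: set() for cat in cats}
  let valid_dict : PySem.Dict String (PySem.Set (List Int)) :=
    cats.foldl (fun d cat => d.insert cat PySem.Set.empty) PySem.Dict.empty
  -- for clause in valid_clauses: is_new_type = True; for key in …: for baseclause in …[key]: …
  let final := valid_clauses.foldl
    (fun vd clause =>
      let r := (PySem.Dict.ofList base_clauses_with_cats).items.foldl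
        (fun (acc : PySem.Dict String (PySem.Set (List Int)) × Bool) kv =>
          kv.2.foldl
            (fun (acc : PySem.Dict String (PySem.Set (List Int)) × Bool) baseclause =>
              if baseclause == clause then
                (acc.1.modify kv.1 PySem.Set.empty (fun s => PySem.Set.add s clause), false)
              else acc)
            acc)
        (vd, true)
      -- if is_new_type: valid_dict["new"].add(clause)
      if r.2 then r.1.modify "new" PySem.Set.empty (fun s => PySem.Set.add s clause) else r.1)
    valid_dict
  final.items

-- ===== PORT B =====
-- Transliteration of Source B. index.setdefault(bc, []).append(key) is Dict.modify bc [] (· ++ [key]);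
-- "keys = index.get(clause); if keys:" is ported as getD with default [] plus an isEmpty test
-- (Python's get returns None for a missing clause and the stored lists are never empty, so the
-- truthiness tests agree); the KeyError branch (valid_dict[key] for key outside the nine
-- categories) is excluded by Pre_, where it is never reached Dict.modify inserts instead.
def classify_validities_alt (base_clauses_with_cats : List (String × List (List Int))) (valid_clauses : List (List Int)) : List (String × List (List Int)) :=
  let cats : List String := ["vcell", "ucell", "vrow", "urow", "vcol", "ucol", "vblock", "ublock", "new"]
  let valid_dict : PySem.Dict String (PySem.Set (List Int)) :=
    cats.foldl (fun d cat => d.insert cat PySem.Set.empty) PySem.Dict.empty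
  -- for key in base: for baseclause in base[key]: index.setdefault(baseclause, []).append(key)
  let index : PySem.Dict (List Int) (List String) :=
    (PySem.Dict.ofList base_clauses_with_cats).items.foldl
      (fun idx kv =>
        kv.2.foldl (fun idx baseclause => idx.modify baseclause [] (fun ks => ks ++ [kv.1])) idx)
      PySem.Dict.empty
  -- for clause in valid_clauses: keys = index.get(clause); if keys: … else: new
  let final := valid_clauses.foldl
    (fun vd clause =>
      let keys := index.getD clause []
      if keys.isEmpty then
        vd.modify "new" PySem.Set.empty (fun s => PySem.Set.add s clause)
      else
        keys.foldl (fun vd key => vd.modify key PySem.Set.empty (fun s => PySem.Set.add s clause)) vd)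
    valid_dict
  final.items

-- ===== PRECONDITION & SPEC =====
def pvCats8 : List String := ["vcell", "ucell", "vrow", "urow", "vcol", "ucol", "vblock", "ublock"]

-- Pre_ excludes inputs where some base-dict entry whose clause list shares a clause with
-- valid_clauses sits under a key other than the eight real categories: under an unknown key
-- both A and B raise KeyError, and under the key "new" both return equal Python dicts of sets
-- but fill the unordered 'new' set in different insertion orders, which the Lean list
-- encoding of sets distinguishes.
def Pre_classify_validities (base_clauses_with_cats : List (String × List (List Int))) (valid_clauses : List (List Int)) : Prop :=
  ∀ kv ∈ (PySem.Dict.ofList base_clauses_with_cats).items, kv.1 ∈ pvCats8 ∨ ∀ c ∈ kv.2, c ∉ valid_clauses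
instance (base_clauses_with_cats : List (String × List (List Int))) (valid_clauses : List (List Int)) : Decidable (Pre_classify_validities base_clauses_with_cats valid_clauses) := by unfold Pre_classify_validities; infer_instance
def pvWitness_classify_validities : (List (String × List (List Int))) × List (List Int) :=
  ([("vcell", [[1, 2]]), ("urow", [])], [[1, 2], [3]])

def Spec_classify_validities (base_clauses_with_cats : List (String × List (List Int))) (valid_clauses : List (List Int)) (out : List (String × List (List Int))) : Prop := out = classify_validities_alt base_clauses_with_cats valid_clauses
instance (base_clauses_with_cats : List (String × List (List Int))) (valid_clauses : List (List Int)) (out : List (String × List (List Int))) : Decidable (Spec_classify_validities base_clauses_with_cats valid_clauses out) := by unfold Spec_classify_validities; infer_instance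

-- ===== CLAIM (what is proved, stated in full; the proofs are below) =====
def Claim_equal_classify_validities : Prop := ∀ (base_clauses_with_cats : List (String × List (List Int))) (valid_clauses : List (List Int)), Dom_classify_validities base_clauses_with_cats valid_clauses → Pre_classify_validities base_clauses_with_cats valid_clauses → Spec_classify_validities base_clauses_with_cats valid_clauses (classify_validities base_clauses_with_cats valid_clauses)

-- ===== LEMMAS AND PROOFS =====

-- proof-side abbreviations for the loop bodies and the shared initial dict
def pvCats9 : List String := ["vcell", "ucell", "vrow", "urow", "vcol", "ucol", "vblock", "ublock", "new"]

def pvD0 : PySem.Dict String (PySem.Set (List Int)) :=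
  pvCats9.foldl (fun d cat => d.insert cat PySem.Set.empty) PySem.Dict.empty

def pvUpdA (l : List (String × List (List Int))) (c : List Int)
    (vd : PySem.Dict String (PySem.Set (List Int))) : PySem.Dict String (PySem.Set (List Int)) :=
  l.foldl (fun d kv => if kv.2.contains c then d.modify kv.1 PySem.Set.empty (fun s => PySem.Set.add s c) else d) vd

def pvStepA (l : List (String × List (List Int)))
    (vd : PySem.Dict String (PySem.Set (List Int))) (c : List Int) : PySem.Dict String (PySem.Set (List Int)) :=
  if !(l.any (fun kv => kv.2.contains c)) then
    (pvUpdA l c vd).modify "new" PySem.Set.empty (fun s => PySem.Set.add s c)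
  else pvUpdA l c vd

def pvIdx (l : List (String × List (List Int))) : PySem.Dict (List Int) (List String) :=
  l.foldl
    (fun idx kv => kv.2.foldl (fun idx bc => idx.modify bc [] (fun ks => ks ++ [kv.1])) idx)
    PySem.Dict.empty

def pvStepB (idx : PySem.Dict (List Int) (List String))
    (vd : PySem.Dict String (PySem.Set (List Int))) (c : List Int) : PySem.Dict String (PySem.Set (List Int)) :=
  if (idx.getD c []).isEmpty then
    vd.modify "new" PySem.Set.empty (fun s => PySem.Set.add s c)
  else
    (idx.getD c []).foldl (fun vd k => vd.modify k PySem.Set.empty (fun s => PySem.Set.add s c)) vd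

-- ---- set / dict basics ----
lemma pv_add_idem (s : PySem.Set (List Int)) (c : List Int) :
    PySem.Set.add (PySem.Set.add s c) c = PySem.Set.add s c := by
  simp only [PySem.Set.add, PySem.Set.contains]
  split_ifs with h1 h2 <;> simp_all

lemma pv_keys_modify_contains (d : PySem.Dict String (PySem.Set (List Int))) (k : String)
    (f : PySem.Set (List Int) → PySem.Set (List Int)) (h : d.contains k = true) :
    (d.modify k PySem.Set.empty f).keys = d.keys := by
  rw [PySem.Dict.keys_modify]
  apply PySem.Dict.keys_insert_of_contains
  exact h

lemma pv_getD_modify_ne (d : PySem.Dict String (PySem.Set (List Int))) (k k' : String)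
    (f : PySem.Set (List Int) → PySem.Set (List Int)) (h : k' ≠ k) :
    (d.modify k PySem.Set.empty f).getD k' PySem.Set.empty = d.getD k' PySem.Set.empty := by
  rw [PySem.Dict.getD_modify, if_neg h]

lemma pv_getD_modify_self (d : PySem.Dict String (PySem.Set (List Int))) (k : String)
    (f : PySem.Set (List Int) → PySem.Set (List Int)) :
    (d.modify k PySem.Set.empty f).getD k PySem.Set.empty = f (d.getD k PySem.Set.empty) := by
  rw [PySem.Dict.getD_modify, if_pos rfl]

lemma pv_contains_congr (d d' : PySem.Dict String (PySem.Set (List Int)))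
    (h : d.keys = d'.keys) (k : String) : d.contains k = d'.contains k := by
  by_cases hc : d'.contains k = true
  · rw [hc, PySem.Dict.contains_iff_mem_keys, h]
    exact (PySem.Dict.contains_iff_mem_keys _ _).mp hc
  · have hc' : d'.contains k = false := by simpa using hc
    rw [hc']
    cases hcc : d.contains k
    · rfl
    · exfalso
      have := (PySem.Dict.contains_iff_mem_keys _ _).mp hcc
      rw [h, ← PySem.Dict.contains_iff_mem_keys] at this
      simp_all

-- ---- A's inner loops collapsed ----
lemma pv_innerA (cl : List (List Int)) (c : List Int) (k : String) :
    ∀ acc : PySem.Dict String (PySem.Set (List Int)) × Bool,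
    cl.foldl
      (fun (acc : PySem.Dict String (PySem.Set (List Int)) × Bool) bc =>
        if bc == c then (acc.1.modify k PySem.Set.empty (fun s => PySem.Set.add s c), false) else acc)
      acc
    = (if cl.contains c then acc.1.modify k PySem.Set.empty (fun s => PySem.Set.add s c) else acc.1,
       acc.2 && !cl.contains c) := by
  induction cl with
  | nil => intro acc; simp
  | cons bc cl ih =>
      intro acc
      simp only [List.foldl_cons]
      by_cases hbc : bc = c
      · subst hbc
        rw [if_pos (by simp)]
        rw [ih]
        have hcc : (bc :: cl).contains bc = true := by simp
        by_cases hm : cl.contains bc = true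
        · rw [if_pos hm]
          rw [hcc]
          simp only [PySem.Dict.modify, PySem.Dict.getD_insert_self, PySem.Dict.insert_insert_self, pv_add_idem]
          simp
        · rw [if_neg hm, hcc]
          simp
      · rw [if_neg (by simp [hbc])]
        rw [ih]
        have hcc : (bc :: cl).contains c = cl.contains c := by
          simp [Ne.symm hbc]
        rw [hcc]

lemma pv_outerA (l : List (String × List (List Int))) (c : List Int) :
    ∀ (vd : PySem.Dict String (PySem.Set (List Int))) (b : Bool),
    l.foldl
      (fun (acc : PySem.Dict String (PySem.Set (List Int)) × Bool) kv =>
        kv.2.foldl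
          (fun (acc : PySem.Dict String (PySem.Set (List Int)) × Bool) bc =>
            if bc == c then (acc.1.modify kv.1 PySem.Set.empty (fun s => PySem.Set.add s c), false) else acc)
          acc)
      (vd, b)
    = (pvUpdA l c vd, b && !(l.any (fun kv => kv.2.contains c))) := by
  induction l with
  | nil => intro vd b; simp [pvUpdA]
  | cons kv l ih =>
      intro vd b
      simp only [List.foldl_cons]
      rw [pv_innerA]
      rw [ih]
      simp only [pvUpdA, List.foldl_cons, List.any_cons, Bool.not_or, ← Bool.and_assoc]

lemma pv_portA_eq (base : List (String × List (List Int))) (valid : List (List Int)) :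
    classify_validities base valid
      = (valid.foldl (pvStepA (PySem.Dict.ofList base).items) pvD0).items := by
  unfold classify_validities
  have hF :
      (fun (vd : PySem.Dict String (PySem.Set (List Int))) (clause : List Int) =>
        let r := (PySem.Dict.ofList base).items.foldl
          (fun (acc : PySem.Dict String (PySem.Set (List Int)) × Bool) kv =>
            kv.2.foldl
              (fun (acc : PySem.Dict String (PySem.Set (List Int)) × Bool) baseclause =>
                if baseclause == clause then
                  (acc.1.modify kv.1 PySem.Set.empty (fun s => PySem.Set.add s clause), false)
                else acc)
              acc)
          (vd, true)
        if r.2 then r.1.modify "new" PySem.Set.empty (fun s => PySem.Set.add s clause) else r.1)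
      = pvStepA (PySem.Dict.ofList base).items := by
    funext vd clause
    simp only [pv_outerA, pvStepA, Bool.true_and]
  rw [hF]
  rfl

lemma pv_portB_eq (base : List (String × List (List Int))) (valid : List (List Int)) :
    classify_validities_alt base valid
      = (valid.foldl (pvStepB (pvIdx (PySem.Dict.ofList base).items)) pvD0).items := rfl

-- ---- the inverted index characterized ----
lemma pv_keysOf (l : List (String × List (List Int))) (c : List Int) :
    (pvIdx l).getD c []
      = ((l.flatMap (fun kv => kv.2.map (fun bc => (bc, kv.1)))).filter (fun p => p.1 == c)).map (·.2) := by
  have h : pvIdx l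
      = (l.flatMap (fun kv => kv.2.map (fun bc => (bc, kv.1)))).foldl
          (fun d p => d.modify p.1 [] (fun ks => ks ++ [p.2])) PySem.Dict.empty := by
    rw [List.foldl_flatMap]
    unfold pvIdx
    congr 1
    funext idx kv
    rw [List.foldl_map]
  rw [h, PySem.Dict.getD_foldl_modify_append, PySem.Dict.getD_empty]
  simp

lemma pv_mem_keysOf (l : List (String × List (List Int))) (c : List Int) (k : String) :
    k ∈ (pvIdx l).getD c [] ↔ ∃ kv ∈ l, kv.1 = k ∧ c ∈ kv.2 := by
  rw [pv_keysOf]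
  simp only [List.mem_map, List.mem_filter, List.mem_flatMap, beq_iff_eq]
  constructor
  · rintro ⟨p, ⟨⟨kv, hkv, ⟨bc, hbc, rfl⟩⟩, hc⟩, hk⟩
    simp only at hc hk
    exact ⟨kv, hkv, hk, hc ▸ hbc⟩
  · rintro ⟨kv, hkv, hk, hc⟩
    exact ⟨(c, kv.1), ⟨⟨kv, hkv, ⟨c, hc, rfl⟩⟩, rfl⟩, hk⟩

lemma pv_keysOf_eq_nil (l : List (String × List (List Int))) (c : List Int) :
    (pvIdx l).getD c [] = [] ↔ ∀ kv ∈ l, c ∉ kv.2 := by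
  rw [List.eq_nil_iff_forall_not_mem]
  constructor
  · intro h kv hkv hc
    exact h kv.1 ((pv_mem_keysOf l c kv.1).mpr ⟨kv, hkv, rfl, hc⟩)
  · intro h k hk
    rcases (pv_mem_keysOf l c k).mp hk with ⟨kv, hkv, _, hc⟩
    exact h kv hkv hc

lemma pv_any_iff_mem (l : List (String × List (List Int))) (k : String) (c : List Int) :
    l.any (fun kv => kv.1 == k && kv.2.contains c) = true ↔ k ∈ (pvIdx l).getD c [] := by
  rw [List.any_eq_true, pv_mem_keysOf]
  constructor
  · rintro ⟨kv, hkv, h⟩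
    simp only [Bool.and_eq_true, beq_iff_eq] at h
    exact ⟨kv, hkv, h.1, by simpa using h.2⟩
  · rintro ⟨kv, hkv, hk, hc⟩
    exact ⟨kv, hkv, by simp [hk, hc]⟩

lemma pv_isEmpty_keysOf (l : List (String × List (List Int))) (c : List Int) :
    ((pvIdx l).getD c []).isEmpty = !(l.any (fun kv => kv.2.contains c)) := by
  by_cases h : (l.any (fun kv => kv.2.contains c)) = true
  · rw [h]
    rcases List.any_eq_true.mp h with ⟨kv, hkv, hc⟩
    have hm : kv.1 ∈ (pvIdx l).getD c [] :=
      (pv_mem_keysOf l c kv.1).mpr ⟨kv, hkv, rfl, by simpa using hc⟩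
    rcases hx : (pvIdx l).getD c [] with _ | _
    · rw [hx] at hm; cases hm
    · simp
  · have h' : (l.any (fun kv => kv.2.contains c)) = false := by simpa using h
    rw [h']
    have hnil : (pvIdx l).getD c [] = [] := by
      rw [pv_keysOf_eq_nil]
      intro kv hkv hc
      rw [List.any_eq_false] at h'
      have := h' kv hkv
      simp only [Bool.not_eq_true] at this
      exact (by simpa using this : c ∉ kv.2) hc
    rw [hnil]
    rfl

-- ---- values along A's fold ----
lemma pv_getD_updA (l : List (String × List (List Int))) (c : List Int) (k : String) :
    ∀ vd : PySem.Dict String (PySem.Set (List Int)),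
    (pvUpdA l c vd).getD k PySem.Set.empty
      = if l.any (fun kv => kv.1 == k && kv.2.contains c) then
          PySem.Set.add (vd.getD k PySem.Set.empty) c
        else vd.getD k PySem.Set.empty := by
  induction l with
  | nil => intro vd; simp [pvUpdA]
  | cons kv l ih =>
      intro vd
      have hstep : pvUpdA (kv :: l) c vd
          = pvUpdA l c (if kv.2.contains c then vd.modify kv.1 PySem.Set.empty (fun s => PySem.Set.add s c) else vd) := rfl
      rw [hstep, ih, List.any_cons]
      by_cases hm : kv.2.contains c = true
      · rw [if_pos hm]
        by_cases hk2 : kv.1 = k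
        · subst hk2
          have hbeq : (kv.1 == kv.1) = true := by simp
          simp only [pv_getD_modify_self, pv_add_idem, hbeq, hm, Bool.true_and, Bool.true_or]
          rw [if_pos trivial]
          split <;> rfl
        · have hne : k ≠ kv.1 := fun h => hk2 h.symm
          have hbeq : (kv.1 == k) = false := by simp [hk2]
          simp only [pv_getD_modify_ne _ _ _ _ hne, hbeq, Bool.false_and, Bool.false_or]
      · have hm' : kv.2.contains c = false := by simpa using hm
        rw [if_neg hm, hm']
        simp only [Bool.and_false, Bool.false_or]

lemma pv_keys_updA (l : List (String × List (List Int))) (c : List Int) :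
    ∀ vd : PySem.Dict String (PySem.Set (List Int)),
    (∀ kv ∈ l, kv.2.contains c = true → vd.contains kv.1 = true) →
    (pvUpdA l c vd).keys = vd.keys := by
  induction l with
  | nil => intro vd _; rfl
  | cons kv l ih =>
      intro vd h
      have hstep : pvUpdA (kv :: l) c vd
          = pvUpdA l c (if kv.2.contains c then vd.modify kv.1 PySem.Set.empty (fun s => PySem.Set.add s c) else vd) := rfl
      rw [hstep]
      by_cases h1 : kv.2.contains c = true
      · have hc : vd.contains kv.1 = true := h kv (by simp) h1
        have hkeys : (vd.modify kv.1 PySem.Set.empty (fun s => PySem.Set.add s c)).keys = vd.keys :=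
          pv_keys_modify_contains vd kv.1 _ hc
        rw [if_pos h1, ih _ ?_, hkeys]
        intro kv' hkv' hc'
        have h' : vd.contains kv'.1 = true := h kv' (by simp [hkv']) hc'
        rw [pv_contains_congr _ vd hkeys]
        exact h'
      · rw [if_neg h1]
        exact ih _ (fun kv' hkv' hc' => h kv' (by simp [hkv']) hc')

lemma pv_keys_Afold (l : List (String × List (List Int))) :
    ∀ (valid : List (List Int)) (vd : PySem.Dict String (PySem.Set (List Int))),
    (∀ kv ∈ l, ∀ c ∈ kv.2, c ∈ valid → kv.1 ∈ pvCats8) →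
    vd.keys = pvCats9 →
    (valid.foldl (pvStepA l) vd).keys = pvCats9 := by
  intro valid
  induction valid with
  | nil => intro vd _ hk; simpa using hk
  | cons c valid ih =>
      intro vd hP hk
      simp only [List.foldl_cons]
      apply ih
      · intro kv hkv c' hc' hcv
        exact hP kv hkv c' hc' (by simp [hcv])
      · have hupd : (pvUpdA l c vd).keys = vd.keys := by
          apply pv_keys_updA
          intro kv hkv hc
          have hmem : c ∈ kv.2 := by simpa [PySem.Set.contains] using hc
          have h8 : kv.1 ∈ pvCats8 := hP kv hkv c hmem (by simp)
          have h9 : kv.1 ∈ pvCats9 := by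
            simp only [pvCats8, List.mem_cons, List.not_mem_nil, or_false] at h8
            simp only [pvCats9, List.mem_cons]
            tauto
          rw [PySem.Dict.contains_iff_mem_keys, hk]
          exact h9
        unfold pvStepA
        split
        · have hnew : (pvUpdA l c vd).contains "new" = true := by
            rw [PySem.Dict.contains_iff_mem_keys, hupd, hk]
            simp [pvCats9]
          rw [pv_keys_modify_contains _ _ _ hnew, hupd, hk]
        · rw [hupd, hk]

lemma pv_getD_Afold (l : List (String × List (List Int))) (k : String) (hk : k ≠ "new") :
    ∀ (valid : List (List Int)) (vd : PySem.Dict String (PySem.Set (List Int))),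
    (valid.foldl (pvStepA l) vd).getD k PySem.Set.empty
      = valid.foldl
          (fun s c => if l.any (fun kv => kv.1 == k && kv.2.contains c) then PySem.Set.add s c else s)
          (vd.getD k PySem.Set.empty) := by
  intro valid
  induction valid with
  | nil => intro vd; rfl
  | cons c valid ih =>
      intro vd
      simp only [List.foldl_cons]
      rw [ih]
      congr 1
      unfold pvStepA
      split
      · rw [pv_getD_modify_ne _ _ _ _ hk, pv_getD_updA]
      · rw [pv_getD_updA]

lemma pv_getD_Afold_new (l : List (String × List (List Int))) :
    ∀ (valid : List (List Int)) (vd : PySem.Dict String (PySem.Set (List Int))),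
    (∀ c ∈ valid, l.any (fun kv => kv.1 == "new" && kv.2.contains c) = false) →
    (valid.foldl (pvStepA l) vd).getD "new" PySem.Set.empty
      = valid.foldl
          (fun s c => if !(l.any (fun kv => kv.2.contains c)) then PySem.Set.add s c else s)
          (vd.getD "new" PySem.Set.empty) := by
  intro valid
  induction valid with
  | nil => intro vd _; rfl
  | cons c valid ih =>
      intro vd hC
      simp only [List.foldl_cons]
      rw [ih _ (fun c' hc' => hC c' (by simp [hc']))]
      congr 1
      have hno : l.any (fun kv => kv.1 == "new" && kv.2.contains c) = false := hC c (by simp)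
      unfold pvStepA
      by_cases hcond : (l.any fun kv => kv.2.contains c) = true
      · rw [if_neg (show ¬((!l.any fun kv => kv.2.contains c) = true) by rw [hcond]; simp)]
        rw [pv_getD_updA, hno, if_neg (by simp)]
        show vd.getD "new" PySem.Set.empty
            = if (!l.any fun kv => kv.2.contains c) = true then
                PySem.Set.add (vd.getD "new" PySem.Set.empty) c
              else vd.getD "new" PySem.Set.empty
        rw [hcond]
        simp
      · have hcond' : (l.any fun kv => kv.2.contains c) = false := by simpa using hcond
        rw [if_pos (show ((!l.any fun kv => kv.2.contains c) = true) by rw [hcond']; simp)]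
        rw [pv_getD_modify_self, pv_getD_updA, hno, if_neg (by simp)]
        show PySem.Set.add (vd.getD "new" PySem.Set.empty) c
            = if (!l.any fun kv => kv.2.contains c) = true then
                PySem.Set.add (vd.getD "new" PySem.Set.empty) c
              else vd.getD "new" PySem.Set.empty
        rw [hcond']
        simp

-- ---- values along B's fold ----
lemma pv_getD_innerB (ks : List String) (c : List Int) (k : String) :
    ∀ d : PySem.Dict String (PySem.Set (List Int)),
    (ks.foldl (fun d k' => d.modify k' PySem.Set.empty (fun s => PySem.Set.add s c)) d).getD k PySem.Set.empty
      = if k ∈ ks then PySem.Set.add (d.getD k PySem.Set.empty) c else d.getD k PySem.Set.empty := by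
  induction ks with
  | nil => intro d; simp
  | cons k' ks ih =>
      intro d
      simp only [List.foldl_cons]
      rw [ih]
      rw [PySem.Dict.getD_modify]
      by_cases hk : k = k'
      · subst hk
        rw [if_pos rfl]
        by_cases hm : k ∈ ks
        · rw [if_pos hm, if_pos (by simp), pv_add_idem]
        · rw [if_neg hm, if_pos (by simp)]
      · rw [if_neg hk]
        by_cases hm : k ∈ ks
        · rw [if_pos hm, if_pos (by simp [hm])]
        · rw [if_neg hm, if_neg (by simp [hk, hm])]

lemma pv_keys_innerB (ks : List String) (c : List Int) :
    ∀ d : PySem.Dict String (PySem.Set (List Int)),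
    (∀ k' ∈ ks, d.contains k' = true) →
    (ks.foldl (fun d k' => d.modify k' PySem.Set.empty (fun s => PySem.Set.add s c)) d).keys = d.keys := by
  induction ks with
  | nil => intro d _; rfl
  | cons k' ks ih =>
      intro d h
      simp only [List.foldl_cons]
      have hkeys : (d.modify k' PySem.Set.empty (fun s => PySem.Set.add s c)).keys = d.keys :=
        pv_keys_modify_contains d k' _ (h k' (by simp))
      rw [ih _ ?_, hkeys]
      intro k'' hk''
      rw [pv_contains_congr _ d hkeys]
      exact h k'' (by simp [hk''])

lemma pv_keys_Bfold (idx : PySem.Dict (List Int) (List String)) :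
    ∀ (valid : List (List Int)) (vd : PySem.Dict String (PySem.Set (List Int))),
    (∀ c ∈ valid, ∀ k' ∈ idx.getD c [], k' ∈ pvCats9) →
    vd.keys = pvCats9 →
    (valid.foldl (pvStepB idx) vd).keys = pvCats9 := by
  intro valid
  induction valid with
  | nil => intro vd _ hk; simpa using hk
  | cons c valid ih =>
      intro vd hP hk
      simp only [List.foldl_cons]
      apply ih
      · intro c' hc' k' hk'
        exact hP c' (by simp [hc']) k' hk'
      · unfold pvStepB
        split
        · have hnew : vd.contains "new" = true := by
            rw [PySem.Dict.contains_iff_mem_keys, hk]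
            simp [pvCats9]
          rw [pv_keys_modify_contains _ _ _ hnew, hk]
        · rw [pv_keys_innerB _ c vd ?_, hk]
          intro k' hk'
          rw [PySem.Dict.contains_iff_mem_keys, hk]
          exact hP c (by simp) k' hk'

lemma pv_getD_Bfold (idx : PySem.Dict (List Int) (List String)) (k : String) (hk : k ≠ "new") :
    ∀ (valid : List (List Int)) (vd : PySem.Dict String (PySem.Set (List Int))),
    (valid.foldl (pvStepB idx) vd).getD k PySem.Set.empty
      = valid.foldl
          (fun s c => if k ∈ idx.getD c [] then PySem.Set.add s c else s)
          (vd.getD k PySem.Set.empty) := by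
  intro valid
  induction valid with
  | nil => intro vd; rfl
  | cons c valid ih =>
      intro vd
      simp only [List.foldl_cons]
      rw [ih]
      congr 1
      unfold pvStepB
      by_cases he : ((idx.getD c []).isEmpty) = true
      · rw [if_pos he]
        rw [pv_getD_modify_ne _ _ _ _ hk]
        rw [List.isEmpty_iff] at he
        rw [if_neg (by rw [he]; exact List.not_mem_nil)]
      · rw [if_neg he, pv_getD_innerB]

lemma pv_getD_Bfold_new (idx : PySem.Dict (List Int) (List String)) :
    ∀ (valid : List (List Int)) (vd : PySem.Dict String (PySem.Set (List Int))),
    (∀ c ∈ valid, "new" ∉ idx.getD c []) →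
    (valid.foldl (pvStepB idx) vd).getD "new" PySem.Set.empty
      = valid.foldl
          (fun s c => if ((idx.getD c []).isEmpty) = true then PySem.Set.add s c else s)
          (vd.getD "new" PySem.Set.empty) := by
  intro valid
  induction valid with
  | nil => intro vd _; rfl
  | cons c valid ih =>
      intro vd hno
      simp only [List.foldl_cons]
      rw [ih _ (fun c' hc' => hno c' (by simp [hc']))]
      congr 1
      unfold pvStepB
      by_cases he : ((idx.getD c []).isEmpty) = true
      · rw [if_pos he, if_pos he, pv_getD_modify_self]
      · rw [if_neg he, if_neg he, pv_getD_innerB, if_neg (hno c (by simp))]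

-- ---- the initial dict ----
lemma pv_keys_D0 : pvD0.keys = pvCats9 := by decide

-- ===== VERDICT (by name: the statement is the Claim_ definition above) =====
theorem classify_validities_spec : Claim_equal_classify_validities := by
  intro base valid _hdom hpre
  unfold Spec_classify_validities
  rw [pv_portA_eq, pv_portB_eq]
  set l := (PySem.Dict.ofList base).items with hl
  have hP : ∀ kv ∈ l, ∀ c ∈ kv.2, c ∈ valid → kv.1 ∈ pvCats8 := by
    intro kv hkv c hc hcv
    rcases hpre kv hkv with h8 | hdisj
    · exact h8
    · exact absurd hcv (hdisj c hc)
  have hKeys9 : ∀ c ∈ valid, ∀ k' ∈ (pvIdx l).getD c [], k' ∈ pvCats9 := by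
    intro c hc k' hk'
    rcases (pv_mem_keysOf l c k').mp hk' with ⟨kv, hkv, hkk, hcm⟩
    have h8 : kv.1 ∈ pvCats8 := hP kv hkv c hcm hc
    rw [← hkk]
    simp only [pvCats8, List.mem_cons, List.not_mem_nil, or_false] at h8
    simp only [pvCats9, List.mem_cons]
    tauto
  have hAkeys : ((valid.foldl (pvStepA l) pvD0)).keys = pvCats9 :=
    pv_keys_Afold l valid pvD0 hP pv_keys_D0
  have hBkeys : ((valid.foldl (pvStepB (pvIdx l)) pvD0)).keys = pvCats9 :=
    pv_keys_Bfold (pvIdx l) valid pvD0 hKeys9 pv_keys_D0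
  have hgetD : ∀ k ∈ pvCats9,
      ((valid.foldl (pvStepA l) pvD0)).getD k PySem.Set.empty
        = ((valid.foldl (pvStepB (pvIdx l)) pvD0)).getD k PySem.Set.empty := by
    intro k hk9
    by_cases hknew : k = "new"
    · subst hknew
      have hC : ∀ c ∈ valid, l.any (fun kv => kv.1 == "new" && kv.2.contains c) = false := by
        intro c hc
        rw [List.any_eq_false]
        intro kv hkv
        by_cases hkvn : kv.1 = "new"
        · by_cases hcm : c ∈ kv.2
          · have h8 := hP kv hkv c hcm hc
            rw [hkvn] at h8
            exact absurd h8 (by decide)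
          · simp [hcm]
        · simp [hkvn]
      have hno : ∀ c ∈ valid, "new" ∉ (pvIdx l).getD c [] := by
        intro c hc hmem
        rcases (pv_mem_keysOf l c "new").mp hmem with ⟨kv, hkv, hkk, hcm⟩
        have h8 : kv.1 ∈ pvCats8 := hP kv hkv c hcm hc
        rw [hkk] at h8
        exact absurd h8 (by decide)
      rw [pv_getD_Afold_new l valid pvD0 hC, pv_getD_Bfold_new (pvIdx l) valid pvD0 hno]
      congr 1
      funext s c
      rw [pv_isEmpty_keysOf]
    · rw [pv_getD_Afold l k hknew valid pvD0, pv_getD_Bfold (pvIdx l) k hknew valid pvD0]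
      congr 1
      funext s c
      by_cases h : k ∈ (pvIdx l).getD c []
      · rw [if_pos h, if_pos ((pv_any_iff_mem l k c).mpr h)]
      · rw [if_neg h, if_neg (by
          intro hc
          exact h ((pv_any_iff_mem l k c).mp hc))]
  have hAnd : ((valid.foldl (pvStepA l) pvD0)).keys.Nodup := by
    rw [hAkeys]; decide
  have hBnd : ((valid.foldl (pvStepB (pvIdx l)) pvD0)).keys.Nodup := by
    rw [hBkeys]; decide
  rw [PySem.Dict.items_eq_map_keys _ hAnd PySem.Set.empty,
      PySem.Dict.items_eq_map_keys _ hBnd PySem.Set.empty, hAkeys, hBkeys]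
  apply List.map_congr_left
  intro k hk
  rw [hgetD k hk]
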